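-- pv_equiv track=rewrite | github.com/cloudify-cosmo/aria | aria/parser/framework/elements/node_templates.py | _get_plugins_from_operations
-- ===== SOURCE A (Python) =====
-- import copy
--
-- def _get_plugins_from_operations(operations_lists, processed_plugins):
--     plugins = {}
--     for operations in operations_lists:
--         for operation in operations.values():
--             plugin_name = operation['plugin']
--             if not plugin_name:
--                 continue
--             plugin = processed_plugins[plugin_name]
--             operation_executor = operation['executor']
--             plugin_key = (plugin_name, operation_executor)
--             if plugin_key in plugins:
--                 continue
--             plugin = copy.deepcopy(plugin)
--             plugin['executor'] = operation_executor
--             plugins[plugin_key] = plugin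
--     return plugins.values()
-- ===== SOURCE B (Python) =====
-- import copy
--
-- def _get_plugins_from_operations(operations_lists, processed_plugins):
--     # pass 1: discover the unique (plugin_name, executor) keys in first-occurrence order
--     wanted = {}
--     for operations in operations_lists:
--         for operation in operations.values():
--             plugin_name = operation['plugin']
--             if plugin_name:
--                 wanted.setdefault((plugin_name, operation['executor']))
--     # pass 2: materialize one plugin copy per key
--     result = {}
--     for plugin_name, executor in wanted:
--         plugin = copy.deepcopy(processed_plugins[plugin_name])
--         plugin['executor'] = executor
--         result[(plugin_name, executor)] = plugin
--     return result.values()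
-- ===== Notes on version B (the rewrite author's own statement) =====
-- stated objective: alternative
-- what changed: Replaces A's single fused loop (lookup + deepcopy + insert per operation) by two differently-shaped passes: a discovery pass that records unique (plugin_name, executor) keys in first-occurrence order, then a materialization pass that deep-copies and stamps each plugin once per distinct key.
import Mathlib
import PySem

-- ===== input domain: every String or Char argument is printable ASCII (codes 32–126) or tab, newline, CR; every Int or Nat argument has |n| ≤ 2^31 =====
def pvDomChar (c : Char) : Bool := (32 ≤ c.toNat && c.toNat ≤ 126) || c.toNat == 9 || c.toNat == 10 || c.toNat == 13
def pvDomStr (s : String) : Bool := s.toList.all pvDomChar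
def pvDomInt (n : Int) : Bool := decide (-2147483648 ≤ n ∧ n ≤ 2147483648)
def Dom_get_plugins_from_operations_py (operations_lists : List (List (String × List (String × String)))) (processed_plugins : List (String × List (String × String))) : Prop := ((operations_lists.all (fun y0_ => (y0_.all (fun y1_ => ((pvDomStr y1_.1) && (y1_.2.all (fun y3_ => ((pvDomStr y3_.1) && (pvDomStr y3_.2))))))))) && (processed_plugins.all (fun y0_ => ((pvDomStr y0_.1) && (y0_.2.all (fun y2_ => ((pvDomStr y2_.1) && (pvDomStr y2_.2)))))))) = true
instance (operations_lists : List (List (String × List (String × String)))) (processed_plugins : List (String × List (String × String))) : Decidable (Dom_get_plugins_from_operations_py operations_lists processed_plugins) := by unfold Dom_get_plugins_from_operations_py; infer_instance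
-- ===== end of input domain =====

-- B replaces A's single fused loop by two differently-shaped passes: discover the unique
-- (plugin_name, executor) keys first, then materialize one stamped plugin copy per key.
-- (deepcopy is the identity here: the values are immutable data under this type convention.)

-- ===== PORT A =====
def get_plugins_from_operations_py (operations_lists : List (List (String × List (String × String)))) (processed_plugins : List (String × List (String × String))) : List (List (String × String)) :=
  (operations_lists.foldl
    (fun (plugins : PySem.Dict (String × String) (List (String × String))) operations =>
      (PySem.Dict.ofList operations).values.foldl
        (fun plugins operation =>
          match (PySem.Dict.ofList operation).get? "plugin" with
          | none => plugins  -- Python raises KeyError here; Pre_ excludes it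
          | some plugin_name =>
            if plugin_name = "" then plugins
            else
              match (PySem.Dict.ofList processed_plugins).get? plugin_name with
              | none => plugins  -- KeyError; Pre_ excludes it
              | some plugin =>
                match (PySem.Dict.ofList operation).get? "executor" with
                | none => plugins  -- KeyError; Pre_ excludes it
                | some operation_executor =>
                  let plugin_key := (plugin_name, operation_executor)
                  if plugins.contains plugin_key then plugins
                  else plugins.insert plugin_key
                    ((PySem.Dict.ofList plugin).insert "executor" operation_executor).items)
        plugins)
    PySem.Dict.empty).values

-- ===== PORT B =====
def get_plugins_from_operations_py_alt (operations_lists : List (List (String × List (String × String)))) (processed_plugins : List (String × List (String × String))) : List (List (String × String)) :=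
  -- pass 1: unique (plugin_name, executor) keys, first-occurrence order (dict used as ordered set)
  let wanted : PySem.Set (String × String) :=
    operations_lists.foldl
      (fun ks operations =>
        (PySem.Dict.ofList operations).values.foldl
          (fun (ks : PySem.Set (String × String)) operation =>
            match (PySem.Dict.ofList operation).get? "plugin" with
            | none => ks  -- KeyError; Pre_ excludes it
            | some plugin_name =>
              if plugin_name = "" then ks
              else
                match (PySem.Dict.ofList operation).get? "executor" with
                | none => ks  -- KeyError; Pre_ excludes it
                | some operation_executor => PySem.Set.add ks (plugin_name, operation_executor))
          ks)
      PySem.Set.empty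
  -- pass 2: materialize one plugin per key
  (wanted.foldl
    (fun (result : PySem.Dict (String × String) (List (String × String))) key =>
      match (PySem.Dict.ofList processed_plugins).get? key.1 with
      | none => result  -- KeyError; Pre_ excludes it
      | some plugin =>
        result.insert key ((PySem.Dict.ofList plugin).insert "executor" key.2).items)
    PySem.Dict.empty).values

-- ===== PRECONDITION & SPEC =====
-- Pre_ excludes exactly the inputs where A raises KeyError: an operation without a 'plugin' key,
-- or with a truthy plugin name that is missing from processed_plugins or without an 'executor' key.
def Pre_get_plugins_from_operations_py (operations_lists : List (List (String × List (String × String)))) (processed_plugins : List (String × List (String × String))) : Prop :=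
  ∀ ops ∈ operations_lists, ∀ operation ∈ (PySem.Dict.ofList ops).values,
    (PySem.Dict.ofList operation).contains "plugin" = true ∧
    ((PySem.Dict.ofList operation).getD "plugin" "" ≠ "" →
      (PySem.Dict.ofList processed_plugins).contains ((PySem.Dict.ofList operation).getD "plugin" "") = true ∧
      (PySem.Dict.ofList operation).contains "executor" = true)
instance (operations_lists : List (List (String × List (String × String)))) (processed_plugins : List (String × List (String × String))) : Decidable (Pre_get_plugins_from_operations_py operations_lists processed_plugins) := by unfold Pre_get_plugins_from_operations_py; infer_instance

def pvWitness_get_plugins_from_operations_py : (List (List (String × List (String × String)))) × (List (String × List (String × String))) :=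
  ([[("op", [("plugin", "p"), ("executor", "host")]), ("op2", [("plugin", ""), ("executor", "x")])]],
   [("p", [("name", "p"), ("executor", "orig")])])

def Spec_get_plugins_from_operations_py (operations_lists : List (List (String × List (String × String)))) (processed_plugins : List (String × List (String × String))) (out : List (List (String × String))) : Prop := out = get_plugins_from_operations_py_alt operations_lists processed_plugins
instance (operations_lists : List (List (String × List (String × String)))) (processed_plugins : List (String × List (String × String))) (out : List (List (String × String))) : Decidable (Spec_get_plugins_from_operations_py operations_lists processed_plugins out) := by unfold Spec_get_plugins_from_operations_py; infer_instance

-- ===== CLAIM (what is proved, stated in full; the proofs are below) =====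
def Claim_equal_get_plugins_from_operations_py : Prop := ∀ (operations_lists : List (List (String × List (String × String)))) (processed_plugins : List (String × List (String × String))), Dom_get_plugins_from_operations_py operations_lists processed_plugins → Pre_get_plugins_from_operations_py operations_lists processed_plugins → Spec_get_plugins_from_operations_py operations_lists processed_plugins (get_plugins_from_operations_py operations_lists processed_plugins)

-- ===== LEMMAS AND PROOFS =====

-- the per-operation condition Pre_ imposes
def pvPreOp (processed_plugins : List (String × List (String × String))) (operation : List (String × String)) : Prop :=
  (PySem.Dict.ofList operation).contains "plugin" = true ∧
  ((PySem.Dict.ofList operation).getD "plugin" "" ≠ "" →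
    (PySem.Dict.ofList processed_plugins).contains ((PySem.Dict.ofList operation).getD "plugin" "") = true ∧
    (PySem.Dict.ofList operation).contains "executor" = true)

-- A's loop body over one operation
def pvStepA (processed_plugins : List (String × List (String × String))) (plugins : PySem.Dict (String × String) (List (String × String))) (operation : List (String × String)) : PySem.Dict (String × String) (List (String × String)) :=
  match (PySem.Dict.ofList operation).get? "plugin" with
  | none => plugins
  | some plugin_name =>
    if plugin_name = "" then plugins
    else
      match (PySem.Dict.ofList processed_plugins).get? plugin_name with
      | none => plugins
      | some plugin =>
        match (PySem.Dict.ofList operation).get? "executor" with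
        | none => plugins
        | some operation_executor =>
          let plugin_key := (plugin_name, operation_executor)
          if plugins.contains plugin_key then plugins
          else plugins.insert plugin_key
            ((PySem.Dict.ofList plugin).insert "executor" operation_executor).items

-- B's first-pass body over one operation
def pvStepK (ks : PySem.Set (String × String)) (operation : List (String × String)) : PySem.Set (String × String) :=
  match (PySem.Dict.ofList operation).get? "plugin" with
  | none => ks
  | some plugin_name =>
    if plugin_name = "" then ks
    else
      match (PySem.Dict.ofList operation).get? "executor" with
      | none => ks
      | some operation_executor => PySem.Set.add ks (plugin_name, operation_executor)

-- B's second-pass (materialization) body over one key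
def pvMat (processed_plugins : List (String × List (String × String))) (result : PySem.Dict (String × String) (List (String × String))) (key : String × String) : PySem.Dict (String × String) (List (String × String)) :=
  match (PySem.Dict.ofList processed_plugins).get? key.1 with
  | none => result
  | some plugin => result.insert key ((PySem.Dict.ofList plugin).insert "executor" key.2).items

-- the value pvMat inserts, written with getD
def pvVal (processed_plugins : List (String × List (String × String))) (key : String × String) : List (String × String) :=
  ((PySem.Dict.ofList ((PySem.Dict.ofList processed_plugins).getD key.1 [])).insert "executor" key.2).items

theorem pv_foldl_flatten {α β γ : Type} (g : α → List β) (f : γ → β → γ) (l : List α) (init : γ) :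
    l.foldl (fun s x => (g x).foldl f s) init = (l.flatMap g).foldl f init := by
  induction l generalizing init with
  | nil => rfl
  | cons a l ih => simp [List.foldl_append, ih]

theorem pv_A_eq (ol : List (List (String × List (String × String)))) (pp : List (String × List (String × String))) :
    get_plugins_from_operations_py ol pp = ((ol.flatMap (fun ops => (PySem.Dict.ofList ops).values)).foldl (pvStepA pp) PySem.Dict.empty).values := by
  unfold get_plugins_from_operations_py pvStepA
  rw [pv_foldl_flatten]

theorem pv_B_eq (ol : List (List (String × List (String × String)))) (pp : List (String × List (String × String))) :
    get_plugins_from_operations_py_alt ol pp = (((ol.flatMap (fun ops => (PySem.Dict.ofList ops).values)).foldl pvStepK PySem.Set.empty).foldl (pvMat pp) PySem.Dict.empty).values := by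
  unfold get_plugins_from_operations_py_alt pvStepK pvMat
  rw [pv_foldl_flatten]

theorem pv_mat_eq_insert (pp : List (String × List (String × String))) (ks : List (String × String))
    (h : ∀ k ∈ ks, (PySem.Dict.ofList pp).contains k.1 = true) (d0 : PySem.Dict (String × String) (List (String × String))) :
    ks.foldl (pvMat pp) d0 = ks.foldl (fun res key => res.insert key (pvVal pp key)) d0 := by
  apply PySem.List.foldl_congr_mem'
  intro k hk acc
  have hc := h k hk
  rw [PySem.Dict.contains_eq_isSome_get?] at hc
  obtain ⟨p, hp⟩ := Option.isSome_iff_exists.mp hc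
  simp [pvMat, pvVal, hp, PySem.Dict.getD_eq_get?_getD]

theorem pv_contains_mat (pp : List (String × List (String × String))) (ks : List (String × String))
    (h : ∀ k ∈ ks, (PySem.Dict.ofList pp).contains k.1 = true) (key : String × String) :
    (ks.foldl (pvMat pp) PySem.Dict.empty).contains key = true ↔ key ∈ ks := by
  rw [pv_mat_eq_insert pp ks h, PySem.Dict.contains_iff_mem_keys,
      PySem.Dict.keys_foldl_insert (f := fun _ k => pvVal pp k), PySem.Dict.keys_empty,
      PySem.Set.update_nil_left, PySem.Set.mem_ofList]

theorem pv_main (pp : List (String × List (String × String))) (L : List (List (String × String))) :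
    ∀ (ks : PySem.Set (String × String)),
    (∀ op ∈ L, pvPreOp pp op) → (∀ k ∈ ks, (PySem.Dict.ofList pp).contains k.1 = true) →
    L.foldl (pvStepA pp) (ks.foldl (pvMat pp) PySem.Dict.empty) = (L.foldl pvStepK ks).foldl (pvMat pp) PySem.Dict.empty := by
  induction L with
  | nil => intro ks _ _; rfl
  | cons op L ih =>
    intro ks hpre hks
    obtain ⟨hc, himp⟩ := hpre op (by simp)
    rw [PySem.Dict.contains_eq_isSome_get?] at hc
    obtain ⟨pn, hpn⟩ := Option.isSome_iff_exists.mp hc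
    have hgetD : (PySem.Dict.ofList op).getD "plugin" "" = pn := by
      rw [PySem.Dict.getD_eq_get?_getD, hpn]; rfl
    simp only [List.foldl_cons]
    by_cases hpn0 : pn = ""
    · have hA : pvStepA pp (ks.foldl (pvMat pp) PySem.Dict.empty) op = ks.foldl (pvMat pp) PySem.Dict.empty := by
        simp [pvStepA, hpn, hpn0]
      have hK : pvStepK ks op = ks := by simp [pvStepK, hpn, hpn0]
      rw [hA, hK]
      exact ih ks (fun o ho => hpre o (by simp [ho])) hks
    · obtain ⟨hppc, hec⟩ := himp (by rw [hgetD]; exact hpn0)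
      rw [hgetD] at hppc
      rw [PySem.Dict.contains_eq_isSome_get?] at hppc hec
      obtain ⟨plugin, hplugin⟩ := Option.isSome_iff_exists.mp hppc
      obtain ⟨ex, hex⟩ := Option.isSome_iff_exists.mp hec
      by_cases hmem : (pn, ex) ∈ ks
      · have hcont : (ks.foldl (pvMat pp) PySem.Dict.empty).contains (pn, ex) = true :=
          (pv_contains_mat pp ks hks (pn, ex)).mpr hmem
        have hA : pvStepA pp (ks.foldl (pvMat pp) PySem.Dict.empty) op = ks.foldl (pvMat pp) PySem.Dict.empty := by
          simp [pvStepA, hpn, hpn0, hplugin, hex, hcont]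
        have hK : pvStepK ks op = ks := by
          simp [pvStepK, hpn, hpn0, hex, PySem.Set.add, PySem.Set.contains, hmem]
        rw [hA, hK]
        exact ih ks (fun o ho => hpre o (by simp [ho])) hks
      · have hcont : (ks.foldl (pvMat pp) PySem.Dict.empty).contains (pn, ex) = false := by
          rw [← Bool.not_eq_true, pv_contains_mat pp ks hks (pn, ex)]; exact hmem
        have hA : pvStepA pp (ks.foldl (pvMat pp) PySem.Dict.empty) op
            = (ks.foldl (pvMat pp) PySem.Dict.empty).insert (pn, ex) ((PySem.Dict.ofList plugin).insert "executor" ex).items := by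
          simp [pvStepA, hpn, hpn0, hplugin, hex, hcont]
        have hK : pvStepK ks op = ks ++ [(pn, ex)] := by
          simp [pvStepK, hpn, hpn0, hex, PySem.Set.add, PySem.Set.contains, hmem]
        have hmat : (ks ++ [(pn, ex)]).foldl (pvMat pp) PySem.Dict.empty
            = (ks.foldl (pvMat pp) PySem.Dict.empty).insert (pn, ex) ((PySem.Dict.ofList plugin).insert "executor" ex).items := by
          rw [List.foldl_append]
          simp [pvMat, hplugin]
        have hks' : ∀ k ∈ ks ++ [(pn, ex)], (PySem.Dict.ofList pp).contains k.1 = true := by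
          intro k hk
          rcases List.mem_append.mp hk with h' | h'
          · exact hks k h'
          · simp at h'; subst h'
            rw [PySem.Dict.contains_eq_isSome_get?, hplugin]; rfl
        rw [hA, hK, ← hmat]
        exact ih (ks ++ [(pn, ex)]) (fun o ho => hpre o (by simp [ho])) hks'

-- ===== VERDICT (by name: the statement is the Claim_ definition above) =====
theorem get_plugins_from_operations_py_spec : Claim_equal_get_plugins_from_operations_py := by
  intro ol pp _ hpre
  unfold Spec_get_plugins_from_operations_py
  rw [pv_A_eq, pv_B_eq]
  have h := pv_main pp (ol.flatMap (fun ops => (PySem.Dict.ofList ops).values)) PySem.Set.empty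
    (by
      intro op hop
      obtain ⟨ops, hops, hv⟩ := List.mem_flatMap.mp hop
      exact hpre ops hops op hv)
    (by intro k hk; cases hk)
  rw [← h]; rfl
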